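-- pv_equiv track=rewrite | github.com/Horacjusz/RandomCode | kth_permutation_linear.py | kth_permutation_fast
-- ===== SOURCE A (Python) =====
-- from math import factorial
--
-- def kth_permutation_fast(elements, k):
--     n = len(elements)
--     k %= factorial(n)
--     factorials = [factorial(i) for i in range(n)]
--     # elements = sorted(elements)
--     used = [False] * n
--     permutation = []
--
--     for i in range(n):
--         fact = factorials[n - 1 - i]
--         index = k // fact
--         k %= fact
--
--         count = -1
--         for j in range(n):
--             if not used[j]:
--                 count += 1
--             if count == index:
--                 permutation.append(elements[j])
--                 used[j] = True
--                 break
--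
--     return permutation
-- ===== SOURCE B (Python) =====
-- from math import factorial
--
-- def kth_permutation_fast(elements, k):
--     # Pop the k//f-th element directly from a shrinking list; divide the
--     # factorial down instead of keeping a table or rescanning a used[] array.
--     remaining = list(elements)
--     permutation = []
--     f = factorial(len(elements))
--     k %= f
--     for m in range(len(elements), 0, -1):
--         f //= m                      # f = (m-1)!
--         permutation.append(remaining.pop(k // f))
--         k %= f
--     return permutation
-- ===== Notes on version B (the rewrite author's own statement) =====
-- stated objective: faster
-- what changed: B pops the index-th element directly from a shrinking list (so A's inner counting scan over the used[] boolean array disappears) and divides one running factorial down instead of precomputing a factorial table.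
import Mathlib
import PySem

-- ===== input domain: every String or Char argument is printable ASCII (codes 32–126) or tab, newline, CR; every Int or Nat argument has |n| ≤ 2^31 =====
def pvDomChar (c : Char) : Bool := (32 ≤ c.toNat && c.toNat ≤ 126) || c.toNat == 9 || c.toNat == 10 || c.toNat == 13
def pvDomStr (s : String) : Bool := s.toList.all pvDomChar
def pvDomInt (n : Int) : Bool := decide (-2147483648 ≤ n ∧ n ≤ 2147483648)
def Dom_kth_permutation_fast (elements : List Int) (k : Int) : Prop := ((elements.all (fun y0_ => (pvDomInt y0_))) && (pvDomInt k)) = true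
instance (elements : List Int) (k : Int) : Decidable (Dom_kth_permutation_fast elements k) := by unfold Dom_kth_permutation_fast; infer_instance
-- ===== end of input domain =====

-- B replaces A's inner counting scan over a used[] array by popping from a shrinking list,
-- and the precomputed factorial table by one running factorial divided down (objective: faster).


-- ===== PORT A =====
-- inner loop `for j in range(n): …` of A: walks elements/used in step, counts unused,
-- breaks at count == index returning the picked element and used with that slot set True
def kthInnerA : List Int → List Bool → Int → Int → (Option Int × List Bool)
  | e :: es, u :: us, index, count =>
    let count' := if u = false then count + 1 else count
    if count' = index then (some e, true :: us)
    else
      let r := kthInnerA es us index count'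
      (r.1, u :: r.2)
  | _, us, _, _ => (none, us)

-- outer loop `for i in range(n)` of A
def kthOuterA (elements factorials : List Int) (n : Nat) (i : Nat) (k : Int)
    (used : List Bool) (perm : List Int) : List Int :=
  if _h : i < n then
    let fact := PySem.List.pyGetD factorials ((n : Int) - 1 - (i : Int)) 0  -- index always in range
    let index := PySem.Int.floordiv k fact
    let k' := PySem.Int.mod k fact
    let r := kthInnerA elements used index (-1)
    kthOuterA elements factorials n (i+1) k' r.2 (perm ++ r.1.toList)
  else perm
  termination_by n - i
  decreasing_by omega

def kth_permutation_fast (elements : List Int) (k : Int) : List Int :=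
  let n := elements.length
  let k := PySem.Int.mod k ((Nat.factorial n : Nat) : Int)
  let factorials := (PySem.List.pyRange 0 (n : Int) 1).map (fun i => ((Nat.factorial i.toNat : Nat) : Int))
  let used := List.replicate n false
  kthOuterA elements factorials n 0 k used []

-- ===== PORT B =====
-- loop `for m in range(len(elements), 0, -1)` of B, counting m down; f = m! on entry
def kthAltLoop : Nat → Int → Int → List Int → List Int → List Int
  | 0, _, _, _, perm => perm
  | m+1, f, k, remaining, perm =>
    let f' := PySem.Int.floordiv f ((m : Int) + 1)
    match PySem.List.pop? remaining (PySem.Int.floordiv k f') with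
    | some (x, rest) => kthAltLoop m f' (PySem.Int.mod k f') rest (perm ++ [x])
    | none => perm  -- Python's pop would raise; unreachable since k // f' < m+1

def kth_permutation_fast_alt (elements : List Int) (k : Int) : List Int :=
  let f := ((Nat.factorial elements.length : Nat) : Int)
  kthAltLoop elements.length f (PySem.Int.mod k f) elements []

-- ===== PRECONDITION & SPEC =====
def Spec_kth_permutation_fast (elements : List Int) (k : Int) (out : List Int) : Prop := out = kth_permutation_fast_alt elements k
instance (elements : List Int) (k : Int) (out : List Int) : Decidable (Spec_kth_permutation_fast elements k out) := by unfold Spec_kth_permutation_fast; infer_instance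

-- ===== CLAIM (what is proved, stated in full; the proofs are below) =====
def Claim_equal_kth_permutation_fast : Prop := ∀ (elements : List Int) (k : Int), Dom_kth_permutation_fast elements k → Spec_kth_permutation_fast elements k (kth_permutation_fast elements k)

-- ===== LEMMAS AND PROOFS =====

-- the elements at positions not yet marked used
def pvUnused (es : List Int) (us : List Bool) : List Int :=
  ((es.zip us).filter (fun p => !p.2)).map Prod.fst

theorem pvUnused_nil (us : List Bool) : pvUnused [] us = [] := by
  simp [pvUnused]

theorem pvUnused_nil_right (es : List Int) : pvUnused es [] = [] := by
  simp [pvUnused]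

theorem pvUnused_cons_true (e : Int) (es : List Int) (us : List Bool) :
    pvUnused (e :: es) (true :: us) = pvUnused es us := by
  simp [pvUnused]

theorem pvUnused_cons_false (e : Int) (es : List Int) (us : List Bool) :
    pvUnused (e :: es) (false :: us) = e :: pvUnused es us := by
  simp [pvUnused]

theorem pvUnused_replicate (es : List Int) : pvUnused es (List.replicate es.length false) = es := by
  induction es with
  | nil => simp [pvUnused]
  | cons e es ih => simpa [List.replicate, pvUnused_cons_false] using ih

-- A's inner scan picks the t-th unused element and marks it used
theorem kthInnerA_spec (es : List Int) : ∀ (us : List Bool) (t : Nat) (c : Int),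
    t < (pvUnused es us).length →
    (kthInnerA es us (c + 1 + (t : Int)) c).1 = (pvUnused es us)[t]? ∧
    pvUnused es (kthInnerA es us (c + 1 + (t : Int)) c).2 = (pvUnused es us).eraseIdx t := by
  induction es with
  | nil => intro us t c h; simp [pvUnused_nil] at h
  | cons e es ih =>
    intro us t c h
    cases us with
    | nil => simp [pvUnused_nil_right] at h
    | cons u us =>
      cases u with
      | true =>
        rw [pvUnused_cons_true] at h ⊢
        simp only [kthInnerA]
        rw [if_neg (by simp; omega)]
        refine ⟨?_, ?_⟩
        · exact (ih us t c h).1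
        · simpa [pvUnused_cons_true] using (ih us t c h).2
      | false =>
        rw [pvUnused_cons_false] at h ⊢
        cases t with
        | zero =>
          simp only [kthInnerA]
          rw [if_pos (by simp)]
          refine ⟨by simp, ?_⟩
          simp [pvUnused_cons_true, List.eraseIdx]
        | succ s =>
          have hs : s < (pvUnused es us).length := by simpa using h
          simp only [kthInnerA]
          rw [if_neg (by simp; omega)]
          rw [show (c + 1 + ((s + 1 : Nat) : Int)) = (c + 1) + 1 + (s : Int) by push_cast; ring]
          simp only [if_true]
          refine ⟨?_, ?_⟩
          · simpa using (ih us s (c + 1) hs).1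
          · rw [pvUnused_cons_false, (ih us s (c + 1) hs).2]
            simp [List.eraseIdx]

-- one unfolding step of A's outer loop, lets reduced
theorem kthOuterA_step (es facts : List Int) (n i : Nat) (k : Int) (us : List Bool)
    (perm : List Int) (hin : i < n) :
    kthOuterA es facts n i k us perm =
      kthOuterA es facts n (i+1)
        (PySem.Int.mod k (PySem.List.pyGetD facts ((n : Int) - 1 - (i : Int)) 0))
        (kthInnerA es us (PySem.Int.floordiv k (PySem.List.pyGetD facts ((n : Int) - 1 - (i : Int)) 0)) (-1)).2
        (perm ++ (kthInnerA es us (PySem.Int.floordiv k (PySem.List.pyGetD facts ((n : Int) - 1 - (i : Int)) 0)) (-1)).1.toList) := by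
  rw [kthOuterA, dif_pos hin]

-- the factorial table of A at index m (m < n) is m!
theorem pvFactTable (n m : Nat) (hm : m < n) :
    PySem.List.pyGetD ((PySem.List.pyRange 0 (n : Int) 1).map (fun i => ((Nat.factorial i.toNat : Nat) : Int))) ((m : Nat) : Int) 0
      = ((Nat.factorial m : Nat) : Int) := by
  have := PySem.List.pyGetD_map_pyRange (fun i => ((Nat.factorial i.toNat : Nat) : Int)) n m 0 hm
  simpa using this

-- main bridge: A's outer loop with m elements still unused equals B's countdown loop
theorem bridge (m : Nat) : ∀ (es : List Int) (n i : Nat) (k : Int) (us : List Bool) (perm : List Int),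
    n = i + m →
    (pvUnused es us).length = m →
    0 ≤ k → k < ((Nat.factorial m : Nat) : Int) →
    kthOuterA es ((PySem.List.pyRange 0 (n : Int) 1).map (fun i => ((Nat.factorial i.toNat : Nat) : Int))) n i k us perm
      = kthAltLoop m ((Nat.factorial m : Nat) : Int) k (pvUnused es us) perm := by
  induction m with
  | zero =>
    intro es n i k us perm hn _ _ _
    rw [kthOuterA]
    simp [kthAltLoop, hn]
  | succ m ih =>
    intro es n i k us perm hn hlen hk0 hk1
    have hin : i < n := by omega
    rw [kthOuterA_step es _ n i k us perm hin]
    have hcast : (n : Int) - 1 - (i : Int) = ((m : Nat) : Int) := by omega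
    rw [hcast, pvFactTable n m (by omega)]
    have hFpos : (0 : Int) < ((Nat.factorial m : Nat) : Int) := by exact_mod_cast Nat.factorial_pos m
    set F : Int := ((Nat.factorial m : Nat) : Int) with hF
    set idx : Int := PySem.Int.floordiv k F with hidx
    have hidx0 : 0 ≤ idx := by
      rw [hidx, PySem.Int.le_floordiv_iff_mul_le hFpos]; simpa using hk0
    have hidx1 : idx < (m : Int) + 1 := by
      rw [hidx, PySem.Int.floordiv_lt_iff_lt_mul hFpos]
      have heq : ((Nat.factorial (m+1) : Nat) : Int) = ((m : Int) + 1) * F := by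
        rw [hF]; push_cast [Nat.factorial_succ]; ring
      rw [← heq]; exact hk1
    set t : Nat := idx.toNat with ht
    have htlt : t < (pvUnused es us).length := by omega
    have hidxt : idx = (-1 : Int) + 1 + (t : Int) := by omega
    obtain ⟨h1, h2⟩ := kthInnerA_spec es us t (-1) htlt
    rw [← hidxt] at h1 h2
    -- alt side: f' = m!
    have hdiv : PySem.Int.floordiv ((Nat.factorial (m+1) : Nat) : Int) ((m : Int) + 1) = F := by
      have hc : ((m : Int) + 1) = (((m + 1 : Nat) : Nat) : Int) := by push_cast; ring
      rw [hc, PySem.Int.floordiv_natCast]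
      rw [hF]; congr 1
      rw [Nat.factorial_succ, Nat.mul_div_cancel_left _ (by omega)]
    rw [kthAltLoop, hdiv, ← hidx]
    have hpop : PySem.List.pop? (pvUnused es us) idx
        = some ((pvUnused es us)[t]'htlt, (pvUnused es us).eraseIdx t) := by
      rw [show idx = ((t : Nat) : Int) by omega]
      exact PySem.List.pop?_natCast _ _ htlt
    rw [hpop]
    have h1' : (kthInnerA es us idx (-1)).1.toList = [(pvUnused es us)[t]'htlt] := by
      rw [h1, List.getElem?_eq_getElem htlt]; rfl
    rw [h1']
    have := ih es n (i+1) (PySem.Int.mod k F) (kthInnerA es us idx (-1)).2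
      (perm ++ [(pvUnused es us)[t]'htlt]) (by omega)
      (by rw [h2]; simp [List.length_eraseIdx, htlt]; omega)
      (PySem.Int.mod_nonneg k hFpos) (by simpa [hF] using PySem.Int.mod_lt k hFpos)
    rw [this, h2]

-- ===== VERDICT (by name: the statement is the Claim_ definition above) =====
theorem kth_permutation_fast_spec : Claim_equal_kth_permutation_fast := by
  intro elements k _
  unfold Spec_kth_permutation_fast kth_permutation_fast kth_permutation_fast_alt
  have hFpos : (0 : Int) < ((Nat.factorial elements.length : Nat) : Int) := by
    exact_mod_cast Nat.factorial_pos elements.length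
  have := bridge elements.length elements elements.length 0
    (PySem.Int.mod k ((Nat.factorial elements.length : Nat) : Int))
    (List.replicate elements.length false) [] (by omega)
    (by rw [pvUnused_replicate])
    (PySem.Int.mod_nonneg k hFpos) (PySem.Int.mod_lt k hFpos)
  simpa [pvUnused_replicate] using this
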